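-- pv_equiv track=rewrite | github.com/seryrzu/centroFlye | scripts/retired/tandem_analyser.py | __get_convolution
-- ===== SOURCE A (Python) =====
-- def __get_convolution(rep_kmers):
--     conv, union_conv = {}, []
--     for kmer in rep_kmers:
--         pos = rep_kmers[kmer]
--         conv[kmer] = sorted(y - x for x, y in zip(pos[:-1], pos[1:]))
--         union_conv += conv[kmer]
--     union_conv.sort()
--     return conv, union_conv
-- ===== SOURCE B (Python) =====
-- def _merge(a, b):
--     out, i, j = [], 0, 0
--     while i < len(a) and j < len(b):
--         if a[i] <= b[j]:
--             out.append(a[i]); i += 1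
--         else:
--             out.append(b[j]); j += 1
--     out.extend(a[i:])
--     out.extend(b[j:])
--     return out
--
--
-- def __get_convolution(rep_kmers):
--     conv = {kmer: sorted(b - a for a, b in zip(pos, pos[1:]))
--             for kmer, pos in rep_kmers.items()}
--     runs = list(conv.values())
--     while len(runs) > 1:
--         runs = [_merge(runs[i], runs[i + 1]) if i + 1 < len(runs) else runs[i]
--                 for i in range(0, len(runs), 2)]
--     union_conv = runs[0] if runs else []
--     return conv, union_conv
-- ===== Notes on version B (the rewrite author's own statement) =====
-- stated objective: alternative
-- what changed: Builds conv by a dict comprehension over items (zip(pos, pos[1:]) instead of slicing both ends) and produces the sorted union by tournament merging — repeated rounds of two-way merges of the already-sorted per-kmer gap lists — instead of concatenating everything and running a full sort at the end.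
import Mathlib
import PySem

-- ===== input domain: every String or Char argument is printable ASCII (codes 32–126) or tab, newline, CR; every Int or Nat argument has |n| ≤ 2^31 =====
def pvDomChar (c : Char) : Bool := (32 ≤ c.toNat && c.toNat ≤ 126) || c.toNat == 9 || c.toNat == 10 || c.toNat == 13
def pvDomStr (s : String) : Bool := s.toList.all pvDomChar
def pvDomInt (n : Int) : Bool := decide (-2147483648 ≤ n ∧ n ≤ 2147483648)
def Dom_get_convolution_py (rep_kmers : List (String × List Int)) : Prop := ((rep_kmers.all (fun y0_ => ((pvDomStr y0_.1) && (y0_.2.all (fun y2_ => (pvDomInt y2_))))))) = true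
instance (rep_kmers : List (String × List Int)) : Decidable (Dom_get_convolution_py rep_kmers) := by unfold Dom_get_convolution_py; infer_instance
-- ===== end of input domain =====

-- B replaces A's final concatenate-then-sort of the union by an incremental merge of the
-- already-sorted per-kmer gap lists (objective: alternative aggregation strategy, same result).

-- ===== PORT A =====
-- sorted(y - x for x, y in zip(pos[:-1], pos[1:]))
def pvGapsA (pos : List Int) : List Int :=
  PySem.List.sorted
    (((PySem.List.slice pos none (some (-1))).zip (PySem.List.slice pos (some 1) none)).map
      (fun q => q.2 - q.1)) (fun x => x) false

def get_convolution_py (rep_kmers : List (String × List Int)) : (List (String × List Int)) × List Int :=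
  -- the dict conv is an assoc list; the Python argument is a dict (distinct keys), so
  -- 'for kmer in rep_kmers: pos = rep_kmers[kmer]' iterates the pairs and conv[kmer] = … appends a fresh entry
  let st := rep_kmers.foldl
    (fun (st : List (String × List Int) × List Int) p =>
      let g := pvGapsA p.2
      (st.1 ++ [(p.1, g)], st.2 ++ g)) ([], [])
  (st.1, PySem.List.sorted st.2 (fun x => x) false)

-- ===== PORT B =====
-- the while-loop two-pointer merge of Source B's _merge
def pvMerge : List Int → List Int → List Int
  | [], b => b
  | x :: a, [] => x :: a
  | x :: a, y :: b => if x ≤ y then x :: pvMerge a (y :: b) else y :: pvMerge (x :: a) b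
termination_by a b => a.length + b.length

-- sorted(b - a for a, b in zip(pos, pos[1:]))
def pvGapsB (pos : List Int) : List Int :=
  PySem.List.sorted ((pos.zip pos.tail).map (fun q => q.2 - q.1)) (fun x => x) false

-- one round of the while loop: merge adjacent pairs of runs
def pvMergeRound : List (List Int) → List (List Int)
  | [] => []
  | [g] => [g]
  | g :: h :: t => pvMerge g h :: pvMergeRound t

lemma pvMergeRound_length_le (L : List (List Int)) : (pvMergeRound L).length ≤ L.length := by
  induction L using pvMergeRound.induct with
  | case1 => simp [pvMergeRound]
  | case2 g => simp [pvMergeRound]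
  | case3 g h t ih => simp only [pvMergeRound, List.length_cons]; omega

-- while len(runs) > 1: runs = [merged adjacent pairs];  union_conv = runs[0] if runs else []
def pvMergeAll : List (List Int) → List Int
  | [] => []
  | [g] => g
  | g :: h :: t => pvMergeAll (pvMerge g h :: pvMergeRound t)
termination_by L => L.length
decreasing_by
  have := pvMergeRound_length_le t
  simp only [List.length_cons]; omega

def get_convolution_py_alt (rep_kmers : List (String × List Int)) : (List (String × List Int)) × List Int :=
  let conv := rep_kmers.map (fun p => (p.1, pvGapsB p.2))
  (conv, pvMergeAll (conv.map Prod.snd))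

-- ===== PRECONDITION & SPEC =====
def Spec_get_convolution_py (rep_kmers : List (String × List Int)) (out : (List (String × List Int)) × List Int) : Prop := out = get_convolution_py_alt rep_kmers
instance (rep_kmers : List (String × List Int)) (out : (List (String × List Int)) × List Int) : Decidable (Spec_get_convolution_py rep_kmers out) := by unfold Spec_get_convolution_py; infer_instance

-- ===== CLAIM (what is proved, stated in full; the proofs are below) =====
def Claim_equal_get_convolution_py : Prop := ∀ (rep_kmers : List (String × List Int)), Dom_get_convolution_py rep_kmers → Spec_get_convolution_py rep_kmers (get_convolution_py rep_kmers)

-- ===== LEMMAS AND PROOFS =====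

-- the two gap computations agree: pos[:-1] zip pos[1:]  =  pos zip pos.tail
lemma pvZip_dropLast_tail (pos : List Int) : pos.dropLast.zip pos.tail = pos.zip pos.tail := by
  induction pos with
  | nil => rfl
  | cons x t ih =>
    cases t with
    | nil => rfl
    | cons y u =>
      simp only [List.tail_cons]
      have : (x :: y :: u).dropLast = x :: (y :: u).dropLast := rfl
      rw [this]
      simp only [List.zip_cons_cons]
      have ih' : (y :: u).dropLast.zip u = (y :: u).zip u := by
        have := ih
        simpa using this
      rw [ih']

lemma pvGaps_eq (pos : List Int) : pvGapsA pos = pvGapsB pos := by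
  unfold pvGapsA pvGapsB
  rw [PySem.List.slice_to_neg_one, PySem.List.slice_from_one, pvZip_dropLast_tail]

lemma pvMerge_perm (a b : List Int) : (pvMerge a b).Perm (a ++ b) := by
  induction a, b using pvMerge.induct with
  | case1 b => simp [pvMerge]
  | case2 x a => simp [pvMerge]
  | case3 x a y b h ih =>
    simp only [pvMerge, if_pos h]
    exact (ih.cons x)
  | case4 x a y b h ih =>
    simp only [pvMerge, if_neg h]
    have h1 : (y :: pvMerge (x :: a) b).Perm (y :: x :: (a ++ b)) := ih.cons y
    have h2 : (y :: x :: (a ++ b)).Perm (x :: y :: (a ++ b)) := List.Perm.swap _ _ _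
    have h3 : (x :: y :: (a ++ b)).Perm (x :: a ++ y :: b) :=
      List.Perm.cons x List.perm_middle.symm
    exact (h1.trans h2).trans h3

lemma pvMerge_pairwise (a b : List Int) (ha : a.Pairwise (· ≤ ·)) (hb : b.Pairwise (· ≤ ·)) :
    (pvMerge a b).Pairwise (· ≤ ·) := by
  induction a, b using pvMerge.induct with
  | case1 b => simpa [pvMerge] using hb
  | case2 x a => simpa [pvMerge] using ha
  | case3 x a y b h ih =>
    simp only [pvMerge, if_pos h]
    rw [List.pairwise_cons]
    constructor
    · intro z hz
      have hz' : z ∈ a ++ y :: b := (pvMerge_perm a (y :: b)).mem_iff.mp hz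
      rcases List.mem_append.mp hz' with h1 | h1
      · exact (List.pairwise_cons.mp ha).1 z h1
      · rcases List.mem_cons.mp h1 with rfl | h2
        · exact h
        · exact le_trans h ((List.pairwise_cons.mp hb).1 z h2)
    · exact ih (List.pairwise_cons.mp ha).2 hb
  | case4 x a y b h ih =>
    simp only [pvMerge, if_neg h]
    rw [List.pairwise_cons]
    have hyx : y ≤ x := le_of_not_ge h
    constructor
    · intro z hz
      have hz' : z ∈ (x :: a) ++ b := (pvMerge_perm (x :: a) b).mem_iff.mp hz
      rcases List.mem_append.mp hz' with h1 | h1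
      · rcases List.mem_cons.mp h1 with rfl | h2
        · exact hyx
        · exact le_trans hyx ((List.pairwise_cons.mp ha).1 z h2)
      · exact (List.pairwise_cons.mp hb).1 z h1
    · exact ih ha (List.pairwise_cons.mp hb).2

lemma pvMergeRound_perm (L : List (List Int)) : (pvMergeRound L).flatten.Perm L.flatten := by
  induction L using pvMergeRound.induct with
  | case1 => simp [pvMergeRound]
  | case2 g => simp [pvMergeRound]
  | case3 g h t ih =>
    simp only [pvMergeRound, List.flatten_cons]
    have h1 : (pvMerge g h ++ (pvMergeRound t).flatten).Perm ((g ++ h) ++ (pvMergeRound t).flatten) :=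
      (pvMerge_perm g h).append_right _
    have h2 : ((g ++ h) ++ (pvMergeRound t).flatten).Perm ((g ++ h) ++ t.flatten) :=
      ih.append_left _
    have h3 : ((g ++ h) ++ t.flatten) = g ++ (h ++ t.flatten) := by simp
    exact (h1.trans h2).trans (by rw [h3])

lemma pvMergeRound_pairwise (L : List (List Int)) (hL : ∀ l ∈ L, l.Pairwise (· ≤ ·)) :
    ∀ l ∈ pvMergeRound L, l.Pairwise (· ≤ ·) := by
  induction L using pvMergeRound.induct with
  | case1 => simp [pvMergeRound]
  | case2 g => simpa [pvMergeRound] using hL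
  | case3 g h t ih =>
    intro l hl
    simp only [pvMergeRound, List.mem_cons] at hl
    rcases hl with rfl | hl
    · exact pvMerge_pairwise g h (hL g (by simp)) (hL h (by simp))
    · exact ih (fun l' hl' => hL l' (by simp [hl'])) l hl

-- repeated rounds of pairwise merging of sorted runs yield a sorted permutation of the flatten
lemma pvMergeAll_spec (L : List (List Int)) (hL : ∀ l ∈ L, l.Pairwise (· ≤ ·)) :
    (pvMergeAll L).Perm L.flatten ∧ (pvMergeAll L).Pairwise (· ≤ ·) := by
  induction L using pvMergeAll.induct with
  | case1 => exact ⟨by simp [pvMergeAll], by simp [pvMergeAll]⟩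
  | case2 g => exact ⟨by simp [pvMergeAll], by simpa [pvMergeAll] using hL g (by simp)⟩
  | case3 g h t ih =>
    have hL' : ∀ l ∈ pvMerge g h :: pvMergeRound t, l.Pairwise (· ≤ ·) := by
      intro l hl
      rcases List.mem_cons.mp hl with rfl | hl
      · exact pvMerge_pairwise g h (hL g (by simp)) (hL h (by simp))
      · exact pvMergeRound_pairwise t (fun l' hl' => hL l' (by simp [hl'])) l hl
    obtain ⟨p, s⟩ := ih hL'
    refine ⟨?_, by simpa [pvMergeAll] using s⟩
    have hperm : (pvMerge g h :: pvMergeRound t).flatten.Perm (g :: h :: t).flatten := by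
      simp only [List.flatten_cons]
      have h1 : (pvMerge g h ++ (pvMergeRound t).flatten).Perm ((g ++ h) ++ (pvMergeRound t).flatten) :=
        (pvMerge_perm g h).append_right _
      have h2 : ((g ++ h) ++ (pvMergeRound t).flatten).Perm ((g ++ h) ++ t.flatten) :=
        (pvMergeRound_perm t).append_left _
      have h3 : ((g ++ h) ++ t.flatten) = g ++ (h ++ t.flatten) := by simp
      exact (h1.trans h2).trans (by rw [h3])
    have : pvMergeAll (g :: h :: t) = pvMergeAll (pvMerge g h :: pvMergeRound t) := by
      rw [pvMergeAll]
    rw [this]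
    exact p.trans hperm

lemma pvGapsB_pairwise (pos : List Int) : (pvGapsB pos).Pairwise (· ≤ ·) := by
  unfold pvGapsB
  simpa using PySem.List.sorted_pairwise
    ((pos.zip pos.tail).map (fun q => q.2 - q.1)) (fun x => x)

lemma pvFoldA (rep_kmers : List (String × List Int)) : rep_kmers.foldl
      (fun (st : List (String × List Int) × List Int) p =>
        (st.1 ++ [(p.1, pvGapsA p.2)], st.2 ++ pvGapsA p.2)) ([], [])
      = (rep_kmers.map (fun p => (p.1, pvGapsB p.2)),
         rep_kmers.flatMap (fun p => pvGapsB p.2)) := by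
  induction rep_kmers using List.reverseRecOn with
  | nil => rfl
  | append_singleton l p ih =>
    rw [List.foldl_append, ih]
    simp [pvGaps_eq]

-- ===== VERDICT (by name: the statement is the Claim_ definition above) =====
theorem get_convolution_py_spec : Claim_equal_get_convolution_py := by
  intro rep_kmers _
  unfold Spec_get_convolution_py get_convolution_py get_convolution_py_alt
  simp only []
  rw [pvFoldA rep_kmers]
  refine Prod.ext rfl ?_
  have hL : ∀ l ∈ (rep_kmers.map (fun p => (p.1, pvGapsB p.2))).map Prod.snd,
      l.Pairwise (· ≤ ·) := by
    intro l hl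
    simp only [List.map_map, List.mem_map] at hl
    obtain ⟨p, _, rfl⟩ := hl
    exact pvGapsB_pairwise p.2
  have ⟨hp, hs⟩ := pvMergeAll_spec ((rep_kmers.map (fun p => (p.1, pvGapsB p.2))).map Prod.snd) hL
  have hflat : ((rep_kmers.map (fun p => (p.1, pvGapsB p.2))).map Prod.snd).flatten
      = rep_kmers.flatMap (fun p => pvGapsB p.2) := by
    simp [List.flatten_eq_flatMap, List.flatMap_map, List.map_map]
  rw [hflat] at hp
  exact PySem.List.sorted_id_eq_of_perm_of_pairwise _ _ hp hs
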